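-- pv_equiv track=rewrite | github.com/gbataille/AoC_2020 | day14.py | static_mask_for_masks
-- ===== SOURCE A (Python) =====
-- from typing import Iterator, List, Optional, Set, Tuple
--
-- def static_mask_for_masks(mask: str) -> List[str]:
--     idx = mask.find('X')
--     if idx == -1:
--         return [mask]
--
--     prefix = mask[:idx]
--     sub_masks = static_mask_for_masks(mask[idx + 1:])
--
--     masks = []
--     for sub_mask in sub_masks:
--         masks.append(prefix + '0' + sub_mask)
--         masks.append(prefix + '1' + sub_mask)
--
--     return masks
-- ===== SOURCE B (Python) =====
-- def static_mask_for_masks(mask):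
--     res = ['']
--     for c in mask:
--         if c == 'X':
--             res = [s + b for b in '01' for s in res]
--         else:
--             res = [s + c for s in res]
--     return res
-- ===== Notes on version B (the rewrite author's own statement) =====
-- stated objective: alternative
-- what changed: A recurses on the first wildcard character via find/slice and glues prefix+bit+suffix around each recursive expansion; B is a single left-to-right fold over the characters that extends every partial expansion with the next character (or with both bits at a wildcard), so no searching, slicing or recursion remains, at the cost of re-copying each partial string per character.
import Mathlib
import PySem

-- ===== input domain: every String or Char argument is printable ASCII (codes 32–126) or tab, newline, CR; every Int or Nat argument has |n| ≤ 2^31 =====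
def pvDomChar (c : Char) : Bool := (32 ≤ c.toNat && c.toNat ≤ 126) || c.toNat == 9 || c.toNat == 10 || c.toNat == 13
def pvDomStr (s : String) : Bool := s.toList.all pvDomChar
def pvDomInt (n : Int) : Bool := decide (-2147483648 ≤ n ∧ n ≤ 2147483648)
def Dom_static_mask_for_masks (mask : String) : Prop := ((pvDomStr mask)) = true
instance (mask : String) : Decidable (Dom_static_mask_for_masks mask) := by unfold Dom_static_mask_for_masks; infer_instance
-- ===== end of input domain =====

-- B replaces A's find/slice recursion on the first 'X' by a single left-to-right fold over the
-- characters that extends every partial expansion in place (alternative decomposition: no slicing, no recursion).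

-- ===== PORT A =====
-- termination fact A's recursion cites: the tail after the first 'X' is strictly shorter
lemma pvSliceAfterFind_lt (mask : String) (h : ¬ PySem.Str.find mask "X" = -1) :
    (PySem.Str.slice mask (some (PySem.Str.find mask "X" + 1)) none).toList.length
      < mask.toList.length := by
  have h0 : 0 ≤ PySem.Chars.find mask.toList "X".toList := by
    have := PySem.Chars.neg_one_le_find (s := mask.toList) (sub := "X".toList)
    simp only [PySem.Str.find_eq] at h
    omega
  have hpref := (PySem.Chars.find_spec (s := mask.toList) (sub := "X".toList) h0).1
  have hlt : (PySem.Chars.find mask.toList "X".toList).toNat < mask.toList.length := by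
    by_contra hge
    have hnil : mask.toList.drop (PySem.Chars.find mask.toList "X".toList).toNat = [] :=
      List.drop_eq_nil_of_le (by omega)
    rw [hnil] at hpref
    exact absurd (List.prefix_nil.mp hpref) (by decide)
  have hsl : (PySem.Str.slice mask (some (PySem.Str.find mask "X" + 1)) none).toList
      = mask.toList.drop (PySem.Str.find mask "X" + 1).toNat := by
    simp only [PySem.Str.toList_slice, PySem.Chars.slice_eq_listSlice]
    exact PySem.List.slice_from _ (by simp only [PySem.Str.find_eq]; omega)
  rw [hsl, List.length_drop]
  simp only [PySem.Str.find_eq] at *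
  omega

def static_mask_for_masks (mask : String) : List String :=
  let idx := PySem.Str.find mask "X"
  if h : idx = -1 then [mask]
  else
    let pfx := PySem.Str.slice mask none (some idx)
    let subs := static_mask_for_masks (PySem.Str.slice mask (some (idx + 1)) none)
    subs.foldl (fun masks s => masks ++ [pfx ++ "0" ++ s] ++ [pfx ++ "1" ++ s]) []
termination_by mask.toList.length
decreasing_by exact pvSliceAfterFind_lt mask h


-- ===== PORT B =====
def static_mask_for_masks_alt (mask : String) : List String :=
  mask.toList.foldl
    (fun res c =>
      if c = 'X' then ("01" : String).toList.flatMap (fun b => res.map (fun s => s.push b))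
      else res.map (fun s => s.push c))
    [""]

-- ===== PRECONDITION & SPEC =====
def Spec_static_mask_for_masks (mask : String) (out : List String) : Prop := out = static_mask_for_masks_alt mask
instance (mask : String) (out : List String) : Decidable (Spec_static_mask_for_masks mask out) := by unfold Spec_static_mask_for_masks; infer_instance

-- ===== CLAIM (what is proved, stated in full; the proofs are below) =====
def Claim_equal_static_mask_for_masks : Prop := ∀ (mask : String), Dom_static_mask_for_masks mask → Spec_static_mask_for_masks mask (static_mask_for_masks mask)

-- ===== LEMMAS AND PROOFS =====

-- list-level model of the expansion, recursing on the head character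
def expandL : List Char → List (List Char)
  | [] => [[]]
  | c :: cs =>
    if c = 'X' then (expandL cs).flatMap (fun s => [('0' :: s), ('1' :: s)])
    else (expandL cs).map (c :: ·)


lemma foldB_eq (l : List Char) : ∀ (res : List (List Char)),
    l.foldl
      (fun res c =>
        if c = 'X' then ("01" : String).toList.flatMap (fun b => res.map (fun s => s.push b))
        else res.map (fun s => s.push c))
      (res.map String.ofList)
    = (expandL l).flatMap (fun t => res.map (fun s => String.ofList (s ++ t))) := by
  induction l with
  | nil => intro res; simp [expandL]
  | cons c cs ih =>
    intro res
    by_cases hc : c = 'X'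
    · subst hc
      have hstep :
          ("01" : String).toList.flatMap (fun b => (res.map String.ofList).map (fun s => s.push b))
            = ((res.map (· ++ ['0'])) ++ (res.map (· ++ ['1']))).map String.ofList := by
        simp only [List.map_append, List.map_map, Function.comp_def]
        show List.flatMap _ ['0','1'] = _
        simp only [List.flatMap_cons, List.flatMap_nil, List.append_nil]
        refine congrArg₂ (· ++ ·) ?_ ?_ <;>
          (apply List.map_congr_left; intro a _; apply String.toList_inj.mp; simp)
      rw [List.foldl_cons]
      simp only [if_true]
      rw [hstep, ih]
      show _ = List.flatMap _ (expandL ('X' :: cs))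
      rw [expandL]
      simp only [if_true, List.flatMap_assoc, List.flatMap_cons, List.flatMap_nil,
        List.append_nil, List.map_append, List.map_map, Function.comp_def,
        List.append_assoc, List.singleton_append]
    · rw [List.foldl_cons]
      simp only [if_neg hc]
      have hstep :
          (res.map String.ofList).map (fun s => s.push c)
            = (res.map (· ++ [c])).map String.ofList := by
        simp only [List.map_map, Function.comp_def]
        apply List.map_congr_left; intro a _; apply String.toList_inj.mp; simp
      rw [hstep, ih]
      show _ = List.flatMap _ (expandL (c :: cs))
      rw [expandL]
      simp only [if_neg hc, List.flatMap_map, List.map_map, Function.comp_def,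
        List.append_assoc, List.cons_append, List.nil_append]

lemma expandL_noX (l : List Char) (h : 'X' ∉ l) : expandL l = [l] := by
  induction l with
  | nil => rfl
  | cons c cs ih =>
    simp only [List.mem_cons, not_or] at h
    simp [expandL, Ne.symm h.1, ih h.2]

lemma expandL_append_noX (p l : List Char) (h : 'X' ∉ p) :
    expandL (p ++ l) = (expandL l).map (p ++ ·) := by
  induction p with
  | nil => simp
  | cons c cs ih =>
    simp only [List.mem_cons, not_or] at h
    simp [expandL, Ne.symm h.1, ih h.2, List.map_map, Function.comp_def]


lemma altB_eq (mask : String) :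
    static_mask_for_masks_alt mask = (expandL mask.toList).map String.ofList := by
  have h := foldB_eq mask.toList [[]]
  simpa [static_mask_for_masks_alt, List.map_eq_flatMap] using h

lemma portA_eq (mask : String) :
    static_mask_for_masks mask = (expandL mask.toList).map String.ofList := by
  rw [static_mask_for_masks]
  by_cases h : PySem.Str.find mask "X" = -1
  · rw [dif_pos h]
    have hnoX : 'X' ∉ mask.toList := by
      have := (PySem.Str.find_eq_neg_one_iff (s := mask) (sub := "X")).mp h
      simpa [List.singleton_infix_iff] using this
    rw [expandL_noX _ hnoX]
    simp
  · rw [dif_neg h]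
    have h0 : 0 ≤ PySem.Chars.find mask.toList "X".toList := by
      have := PySem.Chars.neg_one_le_find (s := mask.toList) (sub := "X".toList)
      simp only [PySem.Str.find_eq] at h
      omega
    have hspec := PySem.Chars.find_spec (s := mask.toList) (sub := "X".toList) h0
    set n := (PySem.Chars.find mask.toList "X".toList).toNat with hn
    have hlt : n < mask.toList.length := by
      by_contra hge
      have hnil : mask.toList.drop n = [] := List.drop_eq_nil_of_le (by omega)
      rw [hnil] at hspec
      exact absurd (List.prefix_nil.mp hspec.1) (by decide)
    have hdrop : mask.toList.drop n = 'X' :: mask.toList.drop (n + 1) := by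
      obtain ⟨t, ht⟩ := hspec.1
      have h1 : mask.toList.drop n = 'X' :: t := by simpa using ht.symm
      have h2 : mask.toList.drop (n + 1) = t := by
        have := List.tail_drop (l := mask.toList) (i := n)
        rw [h1] at this
        simpa using this.symm
      rw [h1, h2]
    have htake : 'X' ∉ mask.toList.take n := by
      intro hmem
      obtain ⟨j, hj, hget⟩ := List.mem_iff_getElem.mp hmem
      have hjn : j < n := by simpa using lt_of_lt_of_le hj (by simp)
      have hjl : j < mask.toList.length := by omega
      refine hspec.2 j (by omega) ?_
      rw [List.drop_eq_getElem_cons hjl]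
      have : mask.toList[j] = 'X' := by
        rw [← List.getElem_take (h := by omega)]
        exact hget
      simp [this]
    have hpfx : PySem.List.slice mask.toList none (some (PySem.Chars.find mask.toList ['X']))
        = mask.toList.take n := by
      rw [PySem.List.slice_to _ (by simpa using h0)]
      simp [hn]
    have hsub : (PySem.Str.slice mask (some (PySem.Str.find mask "X" + 1)) none).toList
        = mask.toList.drop (n + 1) := by
      simp only [PySem.Str.toList_slice, PySem.Chars.slice_eq_listSlice]
      rw [PySem.List.slice_from _ (by simp only [PySem.Str.find_eq]; omega)]
      congr 1
      simp only [PySem.Str.find_eq]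
      omega
    have hrec := portA_eq (PySem.Str.slice mask (some (PySem.Str.find mask "X" + 1)) none)
    rw [hsub] at hrec
    have hfold : ∀ (pfx : String) (subs : List String),
        subs.foldl (fun masks s => masks ++ [pfx ++ "0" ++ s] ++ [pfx ++ "1" ++ s]) []
          = subs.flatMap (fun s => [pfx ++ "0" ++ s] ++ [pfx ++ "1" ++ s]) := by
      intro pfx subs
      have hf : (fun (masks : List String) s => masks ++ [pfx ++ "0" ++ s] ++ [pfx ++ "1" ++ s])
          = (fun masks s => masks ++ ([pfx ++ "0" ++ s] ++ [pfx ++ "1" ++ s])) := by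
        funext a b; simp [List.append_assoc]
      rw [hf, PySem.List.foldl_append_eq_flatMap]
      simp
    simp only [hfold, hrec]
    have hsplit : mask.toList = mask.toList.take n ++ 'X' :: mask.toList.drop (n + 1) := by
      conv_lhs => rw [← List.take_append_drop n mask.toList]
      rw [hdrop]
    conv_rhs => rw [hsplit]
    rw [expandL_append_noX _ _ htake]
    rw [show expandL ('X' :: mask.toList.drop (n + 1))
        = (expandL (mask.toList.drop (n + 1))).flatMap (fun s => [('0' :: s), ('1' :: s)]) from by
      rw [expandL]; simp]
    rw [List.flatMap_map]
    simp only [List.map_flatMap]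
    apply congrArg (fun f => List.flatMap f (expandL (List.drop (n + 1) mask.toList)))
    funext a
    simp only [List.map_cons, List.map_nil, List.cons_append, List.nil_append]
    refine congrArg₂ _ ?_ (congrArg₂ _ ?_ rfl) <;>
      (apply String.toList_inj.mp; simp [hpfx])
termination_by mask.toList.length
decreasing_by exact pvSliceAfterFind_lt mask h

-- ===== VERDICT (by name: the statement is the Claim_ definition above) =====
theorem static_mask_for_masks_spec : Claim_equal_static_mask_for_masks := by
  intro mask _
  unfold Spec_static_mask_for_masks
  rw [portA_eq, altB_eq]
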